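-- pv_equiv track=rewrite | github.com/root-11/graph-theory | graph/base.py | same_path
-- ===== SOURCE A (Python) =====
-- from itertools import chain
--
-- def same_path(path1, path2):
--     """Compares two paths to verify whether they're the same despite being offset.
--     Very useful when comparing results from TSP as solutions may be rotations of
--     the same path.
--     :param path1: list of nodes.
--     :param path2: list of nodes.
--     :return: boolean.
--     """
--     if not isinstance(path1, (list, set, tuple)):
--         raise TypeError(f"Expected path1 as Iterable, not {type(path1)}")
--     if not isinstance(path2, (list, set, tuple)):
--         raise TypeError(f"Expected path2 as Iterable, not {type(path2)}")
--
--     if path1 is path2:  # use id system to avoid work.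
--         return True
--     if len(path1) != len(path2) or set(path1) != set(path2):
--         return False
--
--     starts = (ix for ix, n2 in enumerate(path2) if path1[0] == n2)
--     return any(all(a == b for a, b in zip(path1, chain(path2[start:], path2[:start]))) for start in starts)
-- ===== SOURCE B (Python) =====
-- def same_path(path1, path2):
--     """Rotation check via substring search: path1 is a rotation of path2 iff the
--     comma-delimited encoding of path1 occurs in the encoding of path2 doubled."""
--     n = len(path1)
--     if n == 0 or n != len(path2):
--         return False
--     needle = "," + ",".join(map(str, path1)) + ","
--     haystack = "," + ",".join(map(str, path2 + path2)) + ","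
--     return needle in haystack
-- ===== Notes on version B (the rewrite author's own statement) =====
-- stated objective: alternative
-- what changed: Replaces A's set-equality prefilter plus per-candidate-offset rotation comparison by a single substring search: path1 is a rotation of path2 iff the comma-delimited string encoding of path1 occurs in the encoding of path2+path2.
import Mathlib
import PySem

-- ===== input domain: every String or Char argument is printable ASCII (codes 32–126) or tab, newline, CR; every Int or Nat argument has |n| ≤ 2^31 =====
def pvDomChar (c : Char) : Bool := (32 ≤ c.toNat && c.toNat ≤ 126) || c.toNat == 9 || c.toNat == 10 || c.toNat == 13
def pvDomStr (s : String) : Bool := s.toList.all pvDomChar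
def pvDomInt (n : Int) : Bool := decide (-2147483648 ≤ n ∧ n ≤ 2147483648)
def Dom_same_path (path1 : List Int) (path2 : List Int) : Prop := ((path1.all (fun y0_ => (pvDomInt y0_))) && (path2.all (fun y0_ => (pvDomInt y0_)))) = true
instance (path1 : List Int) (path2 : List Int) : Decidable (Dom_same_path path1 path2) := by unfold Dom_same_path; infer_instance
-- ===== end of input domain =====

-- B replaces A's set-prefilter + per-offset rotation scan by one substring search of the
-- comma-delimited encoding of path1 in the encoding of path2 doubled (objective: alternative).
-- Python A's `path1 is path2` identity fast path is unobservable for value (non-aliased)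
-- arguments and has no counterpart under the List value semantics of this port.

-- ===== PORT A =====
def same_path (path1 : List Int) (path2 : List Int) : Bool :=
  if path1.length != path2.length
      || !(PySem.Set.equal (PySem.Set.ofList path1) (PySem.Set.ofList path2)) then
    false
  else
    -- starts = (ix for ix, n2 in enumerate(path2) if path1[0] == n2)
    -- any(all(a == b for a, b in zip(path1, chain(path2[start:], path2[:start]))) for start in starts)
    ((PySem.List.enumerate path2 0).filter
        (fun p => PySem.List.pyGet? path1 0 == some p.2)).any
      (fun p =>
        ((path1.zip (PySem.List.slice path2 (some p.1) none
                      ++ PySem.List.slice path2 none (some p.1))).all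
          (fun q => q.1 == q.2)))

-- ===== PORT B =====
-- the string building and `needle in haystack` are ported on the List Char side (PySem.Chars)
def same_path_alt (path1 : List Int) (path2 : List Int) : Bool :=
  let n := path1.length
  if n == 0 || n != path2.length then false
  else
    let needle := [','] ++ PySem.Chars.join [','] (path1.map PySem.Int.toChars) ++ [',']
    let haystack := [','] ++ PySem.Chars.join [','] ((path2 ++ path2).map PySem.Int.toChars) ++ [',']
    PySem.Chars.isIn needle haystack

-- ===== PRECONDITION & SPEC =====
def Spec_same_path (path1 : List Int) (path2 : List Int) (out : Bool) : Prop := out = same_path_alt path1 path2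
instance (path1 : List Int) (path2 : List Int) (out : Bool) : Decidable (Spec_same_path path1 path2 out) := by unfold Spec_same_path; infer_instance

-- ===== CLAIM (what is proved, stated in full; the proofs are below) =====
def Claim_equal_same_path : Prop := ∀ (path1 : List Int) (path2 : List Int), Dom_same_path path1 path2 → Spec_same_path path1 path2 (same_path path1 path2)

-- ===== LEMMAS AND PROOFS =====

theorem pv_core_step (f n : Nat) (l : List Char) : Nat.toDigitsCore 10 (f+1) n l =
    (if n / 10 = 0 then (n % 10).digitChar :: l else Nat.toDigitsCore 10 f (n/10) ((n % 10).digitChar :: l)) := by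
  conv_lhs => rw [Nat.toDigitsCore]

theorem pv_toDigitsCore_shift (f : Nat) : ∀ (n : Nat) (l : List Char), n < f →
    Nat.toDigitsCore 10 f n l = Nat.toDigitsCore 10 f n [] ++ l := by
  induction f with
  | zero => intro n l h; omega
  | succ f ih =>
    intro n l h
    rw [pv_core_step, pv_core_step]
    by_cases h0 : n / 10 = 0
    · simp [h0]
    · have hn : 10 ≤ n := by
        rcases Nat.lt_or_ge n 10 with h' | h'
        · exact absurd (Nat.div_eq_of_lt h') h0
        · exact h'
      have h1 : n / 10 < f := lt_of_lt_of_le (Nat.div_lt_self (by omega) (by omega)) (by omega)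
      rw [if_neg h0, if_neg h0, ih (n/10) ((n % 10).digitChar :: l) h1, ih (n/10) [(n % 10).digitChar] h1]
      simp


theorem pv_div10_lt {n : Nat} (h0 : n / 10 ≠ 0) : n / 10 < n := by
  have hn : 10 ≤ n := by
    rcases Nat.lt_or_ge n 10 with h' | h'
    · exact absurd (Nat.div_eq_of_lt h') h0
    · exact h'
  exact Nat.div_lt_self (by omega) (by omega)

theorem pv_core_irrel : ∀ (n f g : Nat), n < f → n < g →
    Nat.toDigitsCore 10 f n [] = Nat.toDigitsCore 10 g n [] := by
  intro n
  induction n using Nat.strong_induction_on with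
  | _ n ih =>
    intro f g hf hg
    obtain ⟨f', rfl⟩ : ∃ f', f = f' + 1 := ⟨f - 1, by omega⟩
    obtain ⟨g', rfl⟩ : ∃ g', g = g' + 1 := ⟨g - 1, by omega⟩
    rw [pv_core_step, pv_core_step]
    by_cases h0 : n / 10 = 0
    · simp [h0]
    · have hlt := pv_div10_lt h0
      rw [if_neg h0, if_neg h0,
        pv_toDigitsCore_shift f' (n/10) _ (by omega),
        pv_toDigitsCore_shift g' (n/10) _ (by omega),
        ih (n/10) hlt f' g' (by omega) (by omega)]

theorem pv_toDigits_small {n : Nat} (h : n < 10) : Nat.toDigits 10 n = [Nat.digitChar n] := by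
  unfold Nat.toDigits
  rw [pv_core_step, if_pos (Nat.div_eq_of_lt h), Nat.mod_eq_of_lt h]

theorem pv_toDigits_rec {n : Nat} (h : 10 ≤ n) :
    Nat.toDigits 10 n = Nat.toDigits 10 (n / 10) ++ [Nat.digitChar (n % 10)] := by
  have h0 : n / 10 ≠ 0 := by
    intro hz
    have := Nat.lt_of_div_eq_zero (by omega) hz
    omega
  have hlt := pv_div10_lt h0
  unfold Nat.toDigits
  rw [pv_core_step, if_neg h0, pv_toDigitsCore_shift n (n/10) _ hlt,
    pv_core_irrel (n/10) n (n/10 + 1) hlt (by omega)]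
theorem pv_digitChar_ne (n : Nat) : Nat.digitChar n ≠ ',' ∧ Nat.digitChar n ≠ '-' := by
  by_cases h : n < 16
  · interval_cases n <;> exact ⟨by decide, by decide⟩
  · unfold Nat.digitChar
    repeat rw [if_neg (by omega)]
    exact ⟨by decide, by decide⟩

theorem pv_toDigits_mem : ∀ (n : Nat) {c : Char}, c ∈ Nat.toDigits 10 n →
    ∃ k, k < 10 ∧ c = Nat.digitChar k := by
  intro n
  induction n using Nat.strong_induction_on with
  | _ n ih =>
    intro c hc
    by_cases h : n < 10
    · rw [pv_toDigits_small h] at hc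
      simp at hc
      exact ⟨n, h, hc⟩
    · rw [pv_toDigits_rec (by omega)] at hc
      rcases List.mem_append.mp hc with h' | h'
      · exact ih (n/10) (Nat.div_lt_self (by omega) (by omega)) h'
      · simp at h'
        exact ⟨n % 10, Nat.mod_lt _ (by omega), h'⟩

theorem pv_toDigits_ne_nil (n : Nat) : Nat.toDigits 10 n ≠ [] := by
  by_cases h : n < 10
  · rw [pv_toDigits_small h]; simp
  · rw [pv_toDigits_rec (by omega)]; simp

def pvVal (l : List Char) : Nat := l.foldl (fun a c => 10 * a + (c.toNat - 48)) 0

theorem pv_digitChar_toNat {k : Nat} (h : k < 10) : (Nat.digitChar k).toNat - 48 = k := by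
  interval_cases k <;> decide

theorem pv_val_toDigits (n : Nat) : pvVal (Nat.toDigits 10 n) = n := by
  induction n using Nat.strong_induction_on with
  | _ n ih =>
    by_cases h : n < 10
    · rw [pv_toDigits_small h]
      simp [pvVal, pv_digitChar_toNat h]
    · rw [pv_toDigits_rec (by omega)]
      have := ih (n/10) (Nat.div_lt_self (by omega) (by omega))
      simp only [pvVal, List.foldl_append, List.foldl_cons, List.foldl_nil] at this ⊢
      rw [this, pv_digitChar_toNat (Nat.mod_lt _ (by omega))]
      omega

theorem pv_toDigits_inj {m n : Nat} (h : Nat.toDigits 10 m = Nat.toDigits 10 n) : m = n := by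
  have hm := pv_val_toDigits m
  rw [h, pv_val_toDigits] at hm
  omega

theorem pv_toChars_ne_nil (x : Int) : PySem.Int.toChars x ≠ [] := by
  unfold PySem.Int.toChars
  split
  · simp
  · exact pv_toDigits_ne_nil _

theorem pv_toChars_comma_free (x : Int) : ',' ∉ PySem.Int.toChars x := by
  unfold PySem.Int.toChars
  intro hmem
  split at hmem
  · rcases List.mem_cons.mp hmem with h | h
    · exact absurd h.symm (by decide)
    · obtain ⟨k, _, hk⟩ := pv_toDigits_mem _ h
      exact (pv_digitChar_ne k).1 hk.symm
  · obtain ⟨k, _, hk⟩ := pv_toDigits_mem _ hmem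
    exact (pv_digitChar_ne k).1 hk.symm

theorem pv_toDigits_head_ne_dash (n : Nat) {c : Char} {r : List Char}
    (h : Nat.toDigits 10 n = c :: r) : c ≠ '-' := by
  have : c ∈ Nat.toDigits 10 n := by rw [h]; simp
  obtain ⟨k, _, hk⟩ := pv_toDigits_mem _ this
  subst hk
  exact (pv_digitChar_ne k).2

theorem pv_toChars_inj {x y : Int} (h : PySem.Int.toChars x = PySem.Int.toChars y) : x = y := by
  unfold PySem.Int.toChars at h
  split at h <;> split at h
  · -- both negative
    rename_i hx hy
    simp only [List.cons.injEq, true_and] at h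
    have := pv_toDigits_inj h
    omega
  · -- x neg, y nonneg: heads differ
    rename_i hx hy
    rcases he : Nat.toDigits 10 y.toNat with _ | ⟨c, r⟩
    · exact absurd he (pv_toDigits_ne_nil _)
    · rw [he] at h
      exact absurd (List.cons.injEq .. ▸ h).1.symm (pv_toDigits_head_ne_dash _ he)
  · rename_i hx hy
    rcases he : Nat.toDigits 10 x.toNat with _ | ⟨c, r⟩
    · exact absurd he (pv_toDigits_ne_nil _)
    · rw [he] at h
      exact absurd (List.cons.injEq .. ▸ h.symm).1.symm (pv_toDigits_head_ne_dash _ he)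
  · rename_i hx hy
    have := pv_toDigits_inj h
    omega

def pvJ (l : List Int) : List Char := List.intercalate [','] (l.map PySem.Int.toChars)

theorem pvJ_nil : pvJ [] = [] := rfl

theorem pvJ_singleton (a : Int) : pvJ [a] = PySem.Int.toChars a := by
  simp [pvJ, List.intercalate]

theorem pvJ_cons (a : Int) (l : List Int) (h : l ≠ []) :
    pvJ (a :: l) = PySem.Int.toChars a ++ ',' :: pvJ l := by
  obtain ⟨b, l', rfl⟩ := List.exists_cons_of_ne_nil h
  simp [pvJ, List.intercalate]

theorem pvJ_ne_nil {l : List Int} (h : l ≠ []) : pvJ l ≠ [] := by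
  obtain ⟨a, l', rfl⟩ := List.exists_cons_of_ne_nil h
  cases l' with
  | nil => rw [pvJ_singleton]; exact pv_toChars_ne_nil a
  | cons b t => rw [pvJ_cons a _ (by simp)]; simp [pv_toChars_ne_nil a]

theorem pvJ_append (u w : List Int) (hu : u ≠ []) (hw : w ≠ []) :
    pvJ (u ++ w) = pvJ u ++ ',' :: pvJ w := by
  induction u with
  | nil => exact absurd rfl hu
  | cons a u' ih =>
    cases u' with
    | nil => rw [List.cons_append, List.nil_append, pvJ_cons a w hw, pvJ_singleton]
    | cons b t =>
      rw [List.cons_append, pvJ_cons a _ (by simp), pvJ_cons a _ (by simp),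
        ih (by simp)]
      simp

theorem pv_comma_cancel : ∀ (A B r s : List Char), ',' ∉ A → ',' ∉ B →
    A ++ ',' :: r = B ++ ',' :: s → A = B ∧ r = s := by
  intro A
  induction A with
  | nil =>
    intro B r s _ hB h
    cases B with
    | nil => simpa using h
    | cons c B' =>
      simp only [List.nil_append, List.cons_append, List.cons.injEq] at h
      exact absurd (h.1 ▸ List.mem_cons_self) hB
  | cons c A' ih =>
    intro B r s hA hB h
    cases B with
    | nil =>
      simp only [List.cons_append, List.nil_append, List.cons.injEq] at h
      exact absurd (h.1 ▸ List.mem_cons_self) hA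
    | cons d B' =>
      simp only [List.cons_append, List.cons.injEq] at h
      obtain ⟨h1, h2⟩ := h
      obtain ⟨hAB, hrs⟩ := ih B' r s (fun hm => hA (List.mem_cons_of_mem _ hm))
        (fun hm => hB (List.mem_cons_of_mem _ hm)) h2
      exact ⟨by rw [h1, hAB], hrs⟩

theorem pv_comma_split : ∀ (A : List Char) (u w B : List Char), ',' ∉ A →
    A ++ B = u ++ ',' :: w → ∃ u', u = A ++ u' ∧ B = u' ++ ',' :: w := by
  intro A
  induction A with
  | nil => intro u w B _ h; exact ⟨u, rfl, by simpa using h⟩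
  | cons c A' ih =>
    intro u w B hA h
    cases u with
    | nil =>
      simp only [List.cons_append, List.nil_append, List.cons.injEq] at h
      exact absurd (h.1 ▸ List.mem_cons_self) hA
    | cons d u₂ =>
      simp only [List.cons_append, List.cons.injEq] at h
      obtain ⟨u', hu, hB⟩ := ih u₂ w B (fun hm => hA (List.mem_cons_of_mem _ hm)) h.2
      exact ⟨u', by rw [List.cons_append, hu, h.1], hB⟩

-- J p followed by a comma determines a token-level prefix
theorem pv_enc_prefix : ∀ (p t : List Int), pvJ p ++ [','] <+: pvJ t ++ [','] → p <+: t := by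
  intro p
  induction p with
  | nil => intro t _; exact List.nil_prefix
  | cons a p' ih =>
    intro t hpre
    cases t with
    | nil =>
      exfalso
      have hlen := hpre.length_le
      have h1 : pvJ (a :: p') ≠ [] := pvJ_ne_nil (by simp)
      have h2 : 1 ≤ (pvJ (a :: p')).length := List.length_pos_iff.mpr h1
      simp only [pvJ_nil, List.nil_append, List.length_append, List.length_cons,
        List.length_nil] at hlen
      omega
    | cons b t' =>
      -- write both sides as tok ++ ',' :: R
      have hshape : ∀ (x : Int) (l : List Int), pvJ (x :: l) ++ [','] =
          PySem.Int.toChars x ++ ',' :: (if l.isEmpty then [] else pvJ l ++ [',']) := by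
        intro x l
        cases l with
        | nil => simp [pvJ_singleton]
        | cons y m => rw [pvJ_cons x _ (by simp)]; simp
      obtain ⟨v, hv⟩ := hpre
      rw [hshape, hshape] at hv
      rw [List.append_assoc, List.cons_append] at hv
      obtain ⟨htok, hR⟩ := pv_comma_cancel _ _ _ _ (pv_toChars_comma_free a)
        (pv_toChars_comma_free b) hv
      have hab : a = b := pv_toChars_inj htok
      subst hab
      cases hp' : p'.isEmpty
      · -- p' nonempty
        rw [if_neg (by simp_all)] at hR
        have hp'ne : p' ≠ [] := by simpa [List.isEmpty_iff] using hp'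
        cases ht' : t'.isEmpty
        · rw [if_neg (by simp_all)] at hR
          exact List.cons_prefix_cons.mpr ⟨rfl, ih t' ⟨v, hR⟩⟩
        · exfalso
          rw [if_pos (by simp_all)] at hR
          simp at hR
      · rw [if_pos (by simp_all)] at hR
        have hp'nil : p' = [] := by simpa [List.isEmpty_iff] using hp'
        subst hp'nil
        exact List.cons_prefix_cons.mpr ⟨rfl, List.nil_prefix⟩


theorem pvJ_shape (x : Int) (l : List Int) : pvJ (x :: l) ++ [','] =
    PySem.Int.toChars x ++ ',' :: (if l.isEmpty then [] else pvJ l ++ [',']) := by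
  cases l with
  | nil => simp [pvJ_singleton]
  | cons y m => rw [pvJ_cons x _ (by simp)]; simp

theorem pv_enc_infix_to : ∀ (t p : List Int), p ≠ [] →
    (',' :: (pvJ p ++ [','])) <:+: (',' :: (pvJ t ++ [','])) → p <:+: t := by
  intro t
  induction t with
  | nil =>
    intro p hp ⟨u, v, huv⟩
    exfalso
    have hlen := congrArg List.length huv
    have h1 : 1 ≤ (pvJ p).length := List.length_pos_iff.mpr (pvJ_ne_nil hp)
    simp [pvJ_nil] at hlen
    omega
  | cons b t' ih =>
    intro p hp ⟨u, v, huv⟩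
    cases u with
    | nil =>
      simp only [List.nil_append, List.cons_append, List.cons.injEq] at huv
      have hpre : pvJ p ++ [','] <+: pvJ (b :: t') ++ [','] :=
        ⟨v, by simpa using huv.2⟩
      exact (pv_enc_prefix p (b :: t') hpre).isInfix
    | cons c u' =>
      have huv' : u' ++ (',' :: (pvJ p ++ [','])) ++ v = pvJ (b :: t') ++ [','] := by
        have := huv
        simp only [List.cons_append, List.cons.injEq] at this
        exact this.2
      have h3 : PySem.Int.toChars b ++
          (',' :: (if t'.isEmpty then [] else pvJ t' ++ [','])) =
          u' ++ ',' :: ((pvJ p ++ [',']) ++ v) := by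
        rw [← pvJ_shape, ← huv']
        simp
      obtain ⟨u'', hu'', hB⟩ := pv_comma_split _ _ _ _ (pv_toChars_comma_free b) h3
      cases u'' with
      | nil =>
        simp only [List.nil_append, List.cons.injEq, true_and] at hB
        cases ht' : t'.isEmpty
        · rw [if_neg (by simp [ht'])] at hB
          have hpre : pvJ p ++ [','] <+: pvJ t' ++ [','] := ⟨v, by simpa using hB.symm⟩
          exact ((pv_enc_prefix p t' hpre).isInfix).trans ((List.suffix_cons b t').isInfix)
        · rw [if_pos (by simp [ht'])] at hB
          exact absurd hB.symm (by simp [pvJ_ne_nil hp])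
      | cons d u₃ =>
        simp only [List.cons_append, List.cons.injEq] at hB
        cases ht' : t'.isEmpty
        · rw [if_neg (by simp [ht'])] at hB
          have hinf : (',' :: (pvJ p ++ [','])) <:+: (',' :: (pvJ t' ++ [','])) := by
            refine ⟨',' :: u₃, v, ?_⟩
            rw [List.cons_append, List.cons_append, hB.2]
            simp
          exact (ih p hp hinf).trans ((List.suffix_cons b t').isInfix)
        · rw [if_pos (by simp [ht'])] at hB
          exact absurd hB.2.symm (by simp)

theorem pv_enc_infix_from : ∀ (p t : List Int), p ≠ [] → p <:+: t →
    (',' :: (pvJ p ++ [','])) <:+: (',' :: (pvJ t ++ [','])) := by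
  intro p t hp ⟨u, v, huv⟩
  have claim1 : ∀ (w : List Int), (',' :: (pvJ p ++ [','])) <:+: (',' :: (pvJ (p ++ w) ++ [','])) := by
    intro w
    cases w with
    | nil => simp
    | cons y w' =>
      rw [pvJ_append p (y :: w') hp (by simp)]
      refine ⟨[], pvJ (y :: w') ++ [','], ?_⟩
      simp
  have claim2 : ∀ (u' w : List Int), w ≠ [] →
      (',' :: (pvJ w ++ [','])) <:+: (',' :: (pvJ (u' ++ w) ++ [','])) := by
    intro u' w hw
    cases u' with
    | nil => simp
    | cons a u₂ =>
      rw [pvJ_append (a :: u₂) w (by simp) hw]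
      refine ⟨',' :: pvJ (a :: u₂), [], ?_⟩
      simp
  subst huv
  rw [List.append_assoc]
  exact (claim1 v).trans (claim2 u (p ++ v) (by simp [hp]))

def pvRot (path1 path2 : List Int) : Prop :=
  ∃ s, s < path2.length ∧ path2.drop s ++ path2.take s = path1

theorem pv_rot_iff_infix {p1 p2 : List Int} (hlen : p1.length = p2.length) (hne : p1 ≠ []) :
    pvRot p1 p2 ↔ p1 <:+: (p2 ++ p2) := by
  constructor
  · rintro ⟨s, hs, rfl⟩
    refine ⟨p2.take s, p2.drop s, ?_⟩
    have h : p2.take s ++ (p2.drop s ++ (p2.take s ++ p2.drop s)) = p2 ++ p2 := by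
      rw [List.take_append_drop, ← List.append_assoc, List.take_append_drop]
    simpa [List.append_assoc] using h
  · rintro ⟨u, v, huv⟩
    have hn : p1.length = p2.length := hlen
    have hpos : 0 < p2.length := by
      rw [← hlen]
      exact List.length_pos_iff.mpr hne
    have hulen : u.length ≤ p2.length := by
      have := congrArg List.length huv
      simp at this
      omega
    have hp1 : p1 = ((p2 ++ p2).drop u.length).take p2.length := by
      have : (p2 ++ p2).drop u.length = p1 ++ v := by
        rw [← huv, List.append_assoc, List.drop_left]
      rw [this, List.take_append_of_le_length (by omega), List.take_of_length_le (by omega)]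
    by_cases hu : u.length < p2.length
    · refine ⟨u.length, hu, ?_⟩
      have hk : p2.length - (p2.length - u.length) = u.length := by omega
      rw [hp1, List.drop_append, Nat.sub_eq_zero_of_le (le_of_lt hu), List.drop_zero,
        List.take_append,
        List.take_of_length_le (by simp : (p2.drop u.length).length ≤ p2.length),
        List.length_drop, hk]
    · have hu' : u.length = p2.length := by omega
      refine ⟨0, hpos, ?_⟩
      rw [hp1, hu', List.drop_left, List.take_of_length_le (le_refl _)]
      simp

theorem pv_zip_all_eq : ∀ (l1 l2 : List Int), l1.length = l2.length →
    ((((l1.zip l2).all fun q => q.1 == q.2) = true) ↔ l1 = l2) := by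
  intro l1
  induction l1 with
  | nil =>
    intro l2 h
    cases l2 with
    | nil => simp
    | cons b t => simp at h
  | cons a t1 ih =>
    intro l2 h
    cases l2 with
    | nil => simp at h
    | cons b t2 =>
      simp only [List.zip_cons_cons, List.all_cons, Bool.and_eq_true, beq_iff_eq,
        List.cons.injEq]
      rw [ih t2 (by simpa using h)]

theorem pv_rot_mem {p1 p2 : List Int} (h : pvRot p1 p2) : ∀ x, x ∈ p1 ↔ x ∈ p2 := by
  obtain ⟨s, _, rfl⟩ := h
  intro x
  conv_rhs => rw [← List.take_append_drop s p2]
  simp only [List.mem_append]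
  tauto

theorem pv_rot_ne_nil {p1 p2 : List Int} (hlen : p1.length = p2.length)
    (h : pvRot p1 p2) : p1 ≠ [] := by
  obtain ⟨s, hs, _⟩ := h
  intro hnil
  rw [hnil] at hlen
  simp at hlen
  omega

theorem pv_A_iff (p1 p2 : List Int) :
    same_path p1 p2 = true ↔ p1.length = p2.length ∧ pvRot p1 p2 := by
  unfold same_path
  by_cases hC : (p1.length != p2.length
      || !(PySem.Set.equal (PySem.Set.ofList p1) (PySem.Set.ofList p2))) = true
  · rw [if_pos hC]
    simp only [Bool.false_eq_true, false_iff]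
    rintro ⟨hlen, hrot⟩
    rcases Bool.or_eq_true_iff.mp hC with h | h
    · exact absurd hlen (by simpa using h)
    · have hmem := pv_rot_mem hrot
      have : PySem.Set.equal (PySem.Set.ofList p1) (PySem.Set.ofList p2) = true := by
        rw [PySem.Set.equal_iff]
        intro x
        simp only [PySem.Set.mem_ofList]
        exact hmem x
      simp [this] at h
  · rw [if_neg hC]
    simp only [Bool.or_eq_true, not_or, bne_iff_ne, ne_eq, not_not,
      Bool.not_eq_true] at hC
    obtain ⟨hlen, hset⟩ := hC
    simp only [List.any_eq_true, List.mem_filter, hlen, true_and]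
    constructor
    · rintro ⟨⟨ix, n2⟩, ⟨hmem, hcond⟩, hall⟩
      obtain ⟨k, hk, hpk⟩ := (PySem.List.mem_enumerate_iff _ _ _).mp hmem
      obtain ⟨h1, h2⟩ := Prod.mk.injEq .. ▸ hpk
      rw [h1, h2] at hall
      simp only [zero_add] at hall
      rw [PySem.List.slice_from_natCast, PySem.List.slice_to_natCast] at hall
      have hlen2 : p1.length = (p2.drop k ++ p2.take k).length := by
        simp
        omega
      exact ⟨k, hk, ((pv_zip_all_eq p1 _ hlen2).mp hall).symm⟩
    · rintro ⟨s, hs, heq⟩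
      have hdne : (p2.drop s).length ≠ 0 := by
        simp
        omega
      refine ⟨((s : Int), p2[s]), ⟨?_, ?_⟩, ?_⟩
      · exact (PySem.List.mem_enumerate_iff _ _ _).mpr ⟨s, hs, by simp⟩
      · have : PySem.List.pyGet? p1 0 = some p2[s] := by
          rw [PySem.List.pyGet?_zero, ← heq, List.getElem?_append_left (by omega),
            List.getElem?_drop]
          simp
        simp [this]
      · rw [PySem.List.slice_from_natCast, PySem.List.slice_to_natCast]
        refine (pv_zip_all_eq p1 _ (by simp; omega)).mpr heq.symm

theorem pv_B_iff (p1 p2 : List Int) :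
    same_path_alt p1 p2 = true ↔ p1.length = p2.length ∧ pvRot p1 p2 := by
  unfold same_path_alt
  by_cases hC : (p1.length == 0 || p1.length != p2.length) = true
  · simp only [hC, if_pos]
    simp only [Bool.false_eq_true, false_iff]
    rintro ⟨hlen, hrot⟩
    rcases Bool.or_eq_true_iff.mp hC with h | h
    · exact absurd (by simpa using h) (by simpa using pv_rot_ne_nil hlen hrot)
    · exact absurd hlen (by simpa using h)
  · simp only [hC, if_neg, Bool.not_eq_true]
    simp only [Bool.or_eq_true, not_or, beq_iff_eq, bne_iff_ne, ne_eq, not_not] at hC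
    obtain ⟨hn0, hlen⟩ := hC
    have hne : p1 ≠ [] := by
      intro h
      rw [h] at hn0
      exact hn0 rfl
    rw [PySem.Chars.isIn_iff_infix]
    have hneedle : [','] ++ PySem.Chars.join [','] (p1.map PySem.Int.toChars) ++ [','] =
        ',' :: (pvJ p1 ++ [',']) := by
      simp [PySem.Chars.join, pvJ]
    have hhay : [','] ++ PySem.Chars.join [','] ((p2 ++ p2).map PySem.Int.toChars) ++ [','] =
        ',' :: (pvJ (p2 ++ p2) ++ [',']) := by
      simp [PySem.Chars.join, pvJ]
    rw [hneedle, hhay]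
    constructor
    · intro h
      exact ⟨hlen, (pv_rot_iff_infix hlen hne).mpr (pv_enc_infix_to _ _ hne h)⟩
    · rintro ⟨_, hrot⟩
      exact pv_enc_infix_from _ _ hne ((pv_rot_iff_infix hlen hne).mp hrot)

-- ===== VERDICT (by name: the statement is the Claim_ definition above) =====
theorem same_path_spec : Claim_equal_same_path := by
  intro p1 p2 _
  unfold Spec_same_path
  have h := (pv_A_iff p1 p2).trans (pv_B_iff p1 p2).symm
  exact Bool.coe_iff_coe.mp h
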